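-- pv_equiv track=rewrite | github.com/jojostx/alx-frontend-for-fun | markdown2html.py | wrapList
-- ===== SOURCE A (Python) =====
-- def wrapList(lines=['a', 'b'], list_type='ul'):
--     """
--     Wraps a list in its proper parent element
--     """
--     i = 0
--     while i < len(lines):
--         line = lines[i]
--         j = i
--
--         if line.startswith(f'<{list_type}i>'):
--             lines.insert(j, f'<{list_type}>')
--
--             while ((j + 1) < len(lines)
--                    and lines[j + 1].startswith(f'<{list_type}i>')):
--                 j += 1
--                 lines[j] = lines[j].replace(f'{list_type}i', 'li')
--
--             lines.insert(j + 1, f'</{list_type}>')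
--
--         i = j + 1
--
--     return lines
-- ===== SOURCE B (Python) =====
-- def wrapList(lines=['a', 'b'], list_type='ul'):
--     """
--     Wraps a list in its proper parent element (one-pass state machine).
--     Mutates `lines` in place like the original and returns it.
--     """
--     prefix = f'<{list_type}i>'
--     out = []
--     in_list = False
--     for line in lines:
--         if line.startswith(prefix):
--             if not in_list:
--                 out.append(f'<{list_type}>')
--                 in_list = True
--             out.append(line.replace(f'{list_type}i', 'li'))
--         else:
--             if in_list:
--                 out.append(f'</{list_type}>')
--                 in_list = False
--             out.append(line)
--     if in_list:
--         out.append(f'</{list_type}>')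
--     lines[:] = out
--     return lines
-- ===== Notes on version B (the rewrite author's own statement) =====
-- stated objective: faster
-- what changed: Replaced the nested while loops with index arithmetic and in-place list inserts (each shifting the tail) by a single forward pass with an in_list flag that builds the output once and assigns it back via lines[:] = out.
import Mathlib
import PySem

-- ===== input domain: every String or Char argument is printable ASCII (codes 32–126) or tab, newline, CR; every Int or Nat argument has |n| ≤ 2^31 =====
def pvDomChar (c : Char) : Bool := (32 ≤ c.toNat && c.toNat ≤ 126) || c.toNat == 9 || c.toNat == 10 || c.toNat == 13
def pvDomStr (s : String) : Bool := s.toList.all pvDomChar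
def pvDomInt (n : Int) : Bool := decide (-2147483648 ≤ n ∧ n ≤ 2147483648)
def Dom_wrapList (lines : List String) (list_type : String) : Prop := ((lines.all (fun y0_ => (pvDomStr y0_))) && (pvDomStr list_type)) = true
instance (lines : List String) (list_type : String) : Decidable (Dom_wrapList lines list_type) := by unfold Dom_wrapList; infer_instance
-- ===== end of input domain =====

-- B replaces A's nested while loops (with in-place inserts and index arithmetic) by a single
-- forward pass with an `in_list` flag; A mutates `lines` in place, B performs the same final
-- mutation via `lines[:] = out` — the equivalence proved here is about the return value.

-- f'<{list_type}i>'
def pvPrefix (lt : String) : String := "<" ++ lt ++ "i>"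
-- line.replace(f'{list_type}i', 'li')
def pvRepl (lt : String) (s : String) : String := PySem.Str.replace s (lt ++ "i") "li"

-- ===== PORT A =====
-- inner while of A: replace the leading run of list-item lines; returns (replaced run, rest)
def wrapInner (lt : String) : List String → List String × List String
  | [] => ([], [])
  | x :: xs =>
    if PySem.Str.startswith x (pvPrefix lt) then
      let r := wrapInner lt xs
      (pvRepl lt x :: r.1, r.2)
    else ([], x :: xs)

theorem wrapInner_snd_le (lt : String) (xs : List String) :
    (wrapInner lt xs).2.length ≤ xs.length := by
  induction xs with
  | nil => simp [wrapInner]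
  | cons x xs ih =>
    simp only [wrapInner]
    split
    · simpa using Nat.le_succ_of_le ih
    · simp

-- outer while of A: the current line is checked; on a match A inserts the opening tag,
-- the inner while replaces the whole run starting at the current line, then the closing
-- tag is inserted and scanning resumes after it
def wrapGo (lt : String) : List String → List String
  | [] => []
  | line :: rest =>
    if PySem.Str.startswith line (pvPrefix lt) then
      let r := wrapInner lt rest
      ("<" ++ lt ++ ">") :: pvRepl lt line :: r.1 ++ ("</" ++ lt ++ ">") :: wrapGo lt r.2
    else line :: wrapGo lt rest
termination_by xs => xs.length
decreasing_by
  · have := wrapInner_snd_le lt rest; simp; omega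
  · simp

def wrapList (lines : List String) (list_type : String) : List String :=
  wrapGo list_type lines

-- ===== PORT B =====
-- one step of B's for-loop: state = (out, in_list)
def wrapStep (lt : String) (st : List String × Bool) (line : String) : List String × Bool :=
  if PySem.Str.startswith line (pvPrefix lt) then
    if st.2 then (st.1 ++ [pvRepl lt line], true)
    else (st.1 ++ ["<" ++ lt ++ ">"] ++ [pvRepl lt line], true)
  else
    if st.2 then (st.1 ++ ["</" ++ lt ++ ">"] ++ [line], false)
    else (st.1 ++ [line], false)

-- the trailing 'if in_list: out.append(close)'
def wrapFin (lt : String) (st : List String × Bool) : List String :=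
  if st.2 then st.1 ++ ["</" ++ lt ++ ">"] else st.1

def wrapList_alt (lines : List String) (list_type : String) : List String :=
  wrapFin list_type (lines.foldl (wrapStep list_type) ([], false))

-- ===== PRECONDITION & SPEC =====
def Spec_wrapList (lines : List String) (list_type : String) (out : List String) : Prop := out = wrapList_alt lines list_type
instance (lines : List String) (list_type : String) (out : List String) : Decidable (Spec_wrapList lines list_type out) := by unfold Spec_wrapList; infer_instance

-- ===== CLAIM (what is proved, stated in full; the proofs are below) =====
def Claim_equal_wrapList : Prop := ∀ (lines : List String) (list_type : String), Dom_wrapList lines list_type → Spec_wrapList lines list_type (wrapList lines list_type)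

-- ===== LEMMAS AND PROOFS =====

-- the inner while is takeWhile/dropWhile of the prefix test, with every kept line replaced
theorem wrapInner_eq (lt : String) (xs : List String) :
    wrapInner lt xs =
      ((xs.takeWhile (fun x => PySem.Str.startswith x (pvPrefix lt))).map (pvRepl lt),
       xs.dropWhile (fun x => PySem.Str.startswith x (pvPrefix lt))) := by
  induction xs with
  | nil => simp [wrapInner]
  | cons x xs ih =>
    by_cases h : PySem.Chars.startswith x.toList (pvPrefix lt).toList = true <;>
      simp [wrapInner, h, ih]

-- the fold of B, with either flag value, against the recursion of A
theorem foldB_eq (lt : String) (xs : List String) : ∀ acc : List String,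
    wrapFin lt (xs.foldl (wrapStep lt) (acc, false)) = acc ++ wrapGo lt xs ∧
    wrapFin lt (xs.foldl (wrapStep lt) (acc, true)) =
      acc ++ (xs.takeWhile (fun x => PySem.Str.startswith x (pvPrefix lt))).map (pvRepl lt)
          ++ ("</" ++ lt ++ ">") ::
             wrapGo lt (xs.dropWhile (fun x => PySem.Str.startswith x (pvPrefix lt))) := by
  induction xs with
  | nil => intro acc; simp [wrapFin, wrapGo]
  | cons x xs ih =>
    intro acc
    by_cases h : PySem.Chars.startswith x.toList (pvPrefix lt).toList = true
    · refine ⟨?_, ?_⟩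
      · have hs : wrapStep lt (acc, false) x = (acc ++ ["<" ++ lt ++ ">"] ++ [pvRepl lt x], true) := by
          simp [wrapStep, h]
        rw [List.foldl_cons, hs, (ih _).2]
        simp [wrapGo, h, wrapInner_eq]
      · have hs : wrapStep lt (acc, true) x = (acc ++ [pvRepl lt x], true) := by
          simp [wrapStep, h]
        rw [List.foldl_cons, hs, (ih _).2]
        simp [h]
    · refine ⟨?_, ?_⟩
      · have hs : wrapStep lt (acc, false) x = (acc ++ [x], false) := by
          simp [wrapStep, h]
        rw [List.foldl_cons, hs, (ih _).1]
        simp [wrapGo, h]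
      · have hs : wrapStep lt (acc, true) x = (acc ++ ["</" ++ lt ++ ">"] ++ [x], false) := by
          simp [wrapStep, h]
        rw [List.foldl_cons, hs, (ih _).1]
        simp [wrapGo, h]

-- ===== VERDICT (by name: the statement is the Claim_ definition above) =====
theorem wrapList_spec : Claim_equal_wrapList := by
  intro lines list_type _
  unfold Spec_wrapList wrapList wrapList_alt
  rw [(foldB_eq list_type lines []).1]
  simp
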